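-- pv_equiv track=rewrite | github.com/ZJUguquan/Leetcode | codewars/fizz-buzz.py | solution
-- ===== SOURCE A (Python) =====
-- def solution(number):
--     A, B, C = 0, 0, 0
--     for i in range(1, number):
--         if i % 3 == 0 and i % 5 !=0:
--             A+=1
--         elif i %5 == 0 and i % 3!=0:
--             B+=1
--         elif i % 15 == 0:
--             C+=1
--     return [A,B,C]
-- ===== SOURCE B (Python) =====
-- def solution(number):
--     n = number - 1
--     if n <= 0:
--         return [0, 0, 0]
--     fifteen = n // 15
--     return [n // 3 - fifteen, n // 5 - fifteen, fifteen]
-- ===== Notes on version B (the rewrite author's own statement) =====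
-- stated objective: faster
-- what changed: Replaces the O(n) loop over range(1, number) with closed-form floor-division counts (multiples of 3/5/15 below number).
import Mathlib
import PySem

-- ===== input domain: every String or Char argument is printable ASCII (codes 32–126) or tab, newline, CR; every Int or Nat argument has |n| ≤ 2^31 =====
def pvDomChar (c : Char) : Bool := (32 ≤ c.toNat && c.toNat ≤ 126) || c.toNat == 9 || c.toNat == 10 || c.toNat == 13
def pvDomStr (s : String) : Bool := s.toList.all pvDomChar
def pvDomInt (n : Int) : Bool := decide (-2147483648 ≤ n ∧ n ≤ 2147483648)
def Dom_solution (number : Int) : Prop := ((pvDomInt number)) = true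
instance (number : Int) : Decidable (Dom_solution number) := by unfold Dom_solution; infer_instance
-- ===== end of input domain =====

-- B replaces A's O(n) counting loop with closed-form floor-division counts (objective: faster, asymptotic).


-- ===== PORT A =====
-- the loop body of A, on state (A, B, C)
def solutionStep (st : Int × Int × Int) (i : Int) : Int × Int × Int :=
  if PySem.Int.mod i 3 = 0 ∧ PySem.Int.mod i 5 ≠ 0 then (st.1 + 1, st.2.1, st.2.2)
  else if PySem.Int.mod i 5 = 0 ∧ PySem.Int.mod i 3 ≠ 0 then (st.1, st.2.1 + 1, st.2.2)
  else if PySem.Int.mod i 15 = 0 then (st.1, st.2.1, st.2.2 + 1)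
  else st

def solution (number : Int) : List Int :=
  let s := (PySem.List.pyRange 1 number 1).foldl solutionStep (0, 0, 0)
  [s.1, s.2.1, s.2.2]

-- ===== PORT B =====
def solution_alt (number : Int) : List Int :=
  let n := number - 1
  if n ≤ 0 then [0, 0, 0]
  else
    let fifteen := PySem.Int.floordiv n 15
    [PySem.Int.floordiv n 3 - fifteen, PySem.Int.floordiv n 5 - fifteen, fifteen]

-- ===== PRECONDITION & SPEC =====
def Spec_solution (number : Int) (out : List Int) : Prop := out = solution_alt number
instance (number : Int) (out : List Int) : Decidable (Spec_solution number out) := by unfold Spec_solution; infer_instance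

-- ===== CLAIM (what is proved, stated in full; the proofs are below) =====
def Claim_equal_solution : Prop := ∀ (number : Int), Dom_solution number → Spec_solution number (solution number)

-- ===== LEMMAS AND PROOFS =====

-- A's loop body advances the closed-form counts from n = k to n = k+1
lemma solutionStep_closed (k : Int) (hk : 0 ≤ k) :
    solutionStep (k / 3 - k / 15, k / 5 - k / 15, k / 15) (k + 1) =
      ((k + 1) / 3 - (k + 1) / 15, (k + 1) / 5 - (k + 1) / 15, (k + 1) / 15) := by
  obtain ⟨q, r, hr0, hr15, hkeq⟩ : ∃ q r, 0 ≤ r ∧ r < 15 ∧ k = 15 * q + r :=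
    ⟨k / 15, k % 15, by omega, by omega, by omega⟩
  subst hkeq
  unfold solutionStep
  rw [PySem.Int.mod_eq_emod_of_pos (by norm_num : (0:Int) < 3),
      PySem.Int.mod_eq_emod_of_pos (by norm_num : (0:Int) < 5),
      PySem.Int.mod_eq_emod_of_pos (by norm_num : (0:Int) < 15)]
  interval_cases r <;> split_ifs <;> simp only [Prod.mk.injEq] <;>
    refine ⟨by omega, by omega, by omega⟩

-- loop invariant: folding A's step over range(1, m+1) yields the closed-form counts for n = m
lemma solution_fold (m : Nat) :
    (PySem.List.pyRange 1 ((m : Int) + 1) 1).foldl solutionStep (0, 0, 0) =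
      ((m : Int) / 3 - (m : Int) / 15, (m : Int) / 5 - (m : Int) / 15, (m : Int) / 15) := by
  induction m with
  | zero => simp [PySem.List.pyRange_one_eq_nil]
  | succ k ih =>
      rw [show ((k + 1 : Nat) : Int) + 1 = ((k : Int) + 1) + 1 by push_cast; ring,
          PySem.List.pyRange_one_succ_right (by omega : (1 : Int) ≤ (k : Int) + 1)]
      rw [List.foldl_append, ih]
      simp only [List.foldl]
      rw [solutionStep_closed k (by omega)]
      push_cast
      rfl

theorem solution_spec_aux (number : Int) : solution number = solution_alt number := by
  unfold solution solution_alt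
  by_cases h : number - 1 ≤ 0
  · rw [PySem.List.pyRange_one_eq_nil (by omega)]
    simp [h]
  · have hm : 0 ≤ number - 1 := by omega
    obtain ⟨m, hmeq⟩ := Int.eq_ofNat_of_zero_le hm
    have hnum : number = (m : Int) + 1 := by omega
    rw [hnum]
    have : ¬ ((m : Int) + 1 - 1 ≤ 0) := by omega
    simp only [this, if_false]
    rw [solution_fold m]
    have e3 : PySem.Int.floordiv ((m : Int) + 1 - 1) 3 = (m : Int) / 3 := by
      rw [PySem.Int.floordiv_eq_ediv_of_pos (by norm_num)]; ring_nf
    have e5 : PySem.Int.floordiv ((m : Int) + 1 - 1) 5 = (m : Int) / 5 := by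
      rw [PySem.Int.floordiv_eq_ediv_of_pos (by norm_num)]; ring_nf
    have e15 : PySem.Int.floordiv ((m : Int) + 1 - 1) 15 = (m : Int) / 15 := by
      rw [PySem.Int.floordiv_eq_ediv_of_pos (by norm_num)]; ring_nf
    rw [e3, e5, e15]

-- ===== VERDICT (by name: the statement is the Claim_ definition above) =====
theorem solution_spec : Claim_equal_solution := by
  intro number _
  unfold Spec_solution
  exact solution_spec_aux number
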